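-- pv_equiv track=rewrite | github.com/oatf-spec/spec | docs/scripts/split-spec.py | demote_headings
-- ===== SOURCE A (Python) =====
-- def demote_headings(text):
--     """Shift ### -> ##, #### -> ###, etc."""
--     result = []
--     for line in text.split('\n'):
--         if line.startswith('#### '):
--             result.append('### ' + line[5:])
--         elif line.startswith('### '):
--             result.append('## ' + line[4:])
--         elif line.startswith('##### '):
--             result.append('#### ' + line[6:])
--         else:
--             result.append(line)
--     return '\n'.join(result)
-- ===== SOURCE B (Python) =====
-- def demote_headings(text):
--     """Shift ### -> ##, #### -> ###, etc."""
--     out = []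
--     for line in text.split('\n'):
--         n = 0
--         while n < len(line) and line[n] == '#':
--             n += 1
--         if 3 <= n <= 5 and n < len(line) and line[n] == ' ':
--             line = line[1:]
--         out.append(line)
--     return '\n'.join(out)
-- ===== Notes on version B (the rewrite author's own statement) =====
-- stated objective: alternative
-- what changed: Replaces A's three hardcoded heading-prefix branches by one uniform rule: count the leading run of hash characters and demote by dropping one leading character exactly when that run has length 3 to 5 and is followed by a space.
import Mathlib
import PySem

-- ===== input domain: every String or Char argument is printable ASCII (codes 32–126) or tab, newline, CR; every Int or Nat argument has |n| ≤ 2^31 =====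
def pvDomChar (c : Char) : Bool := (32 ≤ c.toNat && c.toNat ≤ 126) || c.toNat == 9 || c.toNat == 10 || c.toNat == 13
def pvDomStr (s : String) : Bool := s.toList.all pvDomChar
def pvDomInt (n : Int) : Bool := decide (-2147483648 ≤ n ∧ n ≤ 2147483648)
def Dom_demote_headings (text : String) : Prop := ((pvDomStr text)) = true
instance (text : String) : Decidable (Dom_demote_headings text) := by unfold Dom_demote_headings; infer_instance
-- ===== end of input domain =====

-- B replaces A's three explicit prefix-string branches by one measured count of the
-- leading hash run plus a range-and-space test (objective: alternative decomposition).

-- ===== PORT A =====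
-- one branch chain per line, transliterated over the line's code points
def pvLineA (line : List Char) : List Char :=
  if PySem.Chars.startswith line ['#','#','#','#',' '] then
    ['#','#','#',' '] ++ PySem.List.slice line (some 5) none
  else if PySem.Chars.startswith line ['#','#','#',' '] then
    ['#','#',' '] ++ PySem.List.slice line (some 4) none
  else if PySem.Chars.startswith line ['#','#','#','#','#',' '] then
    ['#','#','#','#',' '] ++ PySem.List.slice line (some 6) none
  else
    line

def demote_headings (text : String) : String :=
  let result := (PySem.Chars.splitOn text.toList ['\n']).foldl
    (fun acc line => acc ++ [pvLineA line]) []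
  String.ofList (PySem.Chars.join ['\n'] result)

-- ===== PORT B =====
-- count the leading hash run; demote iff its length n is 3..5 and a space follows
-- (the Python guard 'n < len(line) and line[n] == " "' is exactly pyGet? = some ' ')
def pvLineB (line : List Char) : List Char :=
  let n := (line.takeWhile (fun c => c == '#')).length
  if 3 ≤ n ∧ n ≤ 5 ∧ PySem.List.pyGet? line (n:Int) = some ' ' then PySem.List.slice line (some 1) none else line

def demote_headings_alt (text : String) : String :=
  String.ofList (PySem.Chars.join ['\n']
    ((PySem.Chars.splitOn text.toList ['\n']).map pvLineB))

-- ===== PRECONDITION & SPEC =====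
def Spec_demote_headings (text : String) (out : String) : Prop := out = demote_headings_alt text
instance (text : String) (out : String) : Decidable (Spec_demote_headings text out) := by unfold Spec_demote_headings; infer_instance

-- ===== CLAIM (what is proved, stated in full; the proofs are below) =====
def Claim_equal_demote_headings : Prop := ∀ (text : String), Dom_demote_headings text → Spec_demote_headings text (demote_headings text)

-- ===== LEMMAS AND PROOFS =====
lemma pvLine_eq (cs : List Char) : pvLineA cs = pvLineB cs := by
  rcases cs with _|⟨a, cs⟩
  · decide
  by_cases ha : a = '#'
  case neg =>
    have ha' : (a == '#') = false := by simp [ha]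
    simp [pvLineA, pvLineB, PySem.Chars.startswith, List.isPrefixOf, List.takeWhile, ha', Ne.symm ha]
  subst ha
  rcases cs with _|⟨b, cs⟩
  · decide
  by_cases hb : b = '#'
  case neg =>
    have hb' : (b == '#') = false := by simp [hb]
    simp [pvLineA, pvLineB, PySem.Chars.startswith, List.isPrefixOf, List.takeWhile, hb', Ne.symm hb]
  subst hb
  rcases cs with _|⟨c, cs⟩
  · decide
  by_cases hc : c = '#'
  case neg =>
    have hc' : (c == '#') = false := by simp [hc]
    simp [pvLineA, pvLineB, PySem.Chars.startswith, List.isPrefixOf, List.takeWhile, PySem.List.pyGet?_ofNat', hc', Ne.symm hc]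
  subst hc
  rcases cs with _|⟨d, cs⟩
  · decide
  by_cases hd : d = '#'
  case neg =>
    have hd' : (d == '#') = false := by simp [hd]
    by_cases hsd : d = ' '
    · subst hsd; simp [pvLineA, pvLineB, PySem.Chars.startswith, List.isPrefixOf, List.takeWhile, PySem.List.slice_from, PySem.List.pyGet?_ofNat']
    · simp [pvLineA, pvLineB, PySem.Chars.startswith, List.isPrefixOf, List.takeWhile, PySem.List.pyGet?_ofNat', hd', Ne.symm hd, hsd, Ne.symm hsd]
  subst hd
  rcases cs with _|⟨e, cs⟩
  · decide
  by_cases he : e = '#'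
  case neg =>
    have he' : (e == '#') = false := by simp [he]
    by_cases hse : e = ' '
    · subst hse; simp [pvLineA, pvLineB, PySem.Chars.startswith, List.isPrefixOf, List.takeWhile, PySem.List.slice_from, PySem.List.pyGet?_ofNat']
    · simp [pvLineA, pvLineB, PySem.Chars.startswith, List.isPrefixOf, List.takeWhile, PySem.List.pyGet?_ofNat', he', Ne.symm he, hse, Ne.symm hse]
  subst he
  rcases cs with _|⟨f, cs⟩
  · decide
  by_cases hf : f = '#'
  case neg =>
    have hf' : (f == '#') = false := by simp [hf]
    by_cases hsf : f = ' '
    · subst hsf; simp [pvLineA, pvLineB, PySem.Chars.startswith, List.isPrefixOf, List.takeWhile, PySem.List.slice_from, PySem.List.pyGet?_ofNat']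
    · simp [pvLineA, pvLineB, PySem.Chars.startswith, List.isPrefixOf, List.takeWhile, PySem.List.pyGet?_ofNat', hf', hsf, Ne.symm hsf]
  subst hf
  simp [pvLineA, pvLineB, PySem.Chars.startswith, List.isPrefixOf, List.takeWhile]

-- ===== VERDICT (by name: the statement is the Claim_ definition above) =====
theorem demote_headings_spec : Claim_equal_demote_headings := by
  intro text _
  unfold Spec_demote_headings demote_headings demote_headings_alt
  rw [PySem.List.foldl_append_singleton_eq_map]
  simp [List.map_congr_left (fun cs _ => pvLine_eq cs)]
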